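-- pv_equiv track=rewrite | github.com/tyleralc/DSCI_550_Data_Geeks | question_5_hw_1.py | univ_clean
-- ===== SOURCE A (Python) =====
-- def univ_clean(lst_univs, name):
--
--   USA="United States of America"
--   filtered_lst=[]
--   for x in lst_univs:
--       if USA in str(x):
--           filtered_lst.append(str(x))
--       else:
--           filtered_lst.append('NaN')
--   name_cleaned=[]
--
--   for affil in filtered_lst:
--       if affil == 'NaN':
--           name_cleaned.append('NaN')
--       elif 'University' not in affil:
--           name_cleaned.append('NaN')
--       else:
--           for univ in name:
--               if univ in affil:
--                   name_cleaned.append(univ)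
--   return name_cleaned
-- ===== SOURCE B (Python) =====
-- def univ_clean(lst_univs, name):
--     # Transposed algorithm: compute an eligibility mask, keep buckets only for
--     # the eligible affiliations, then loop over the university names OUTER
--     # (eligible affiliations inner), collecting hits into the buckets; finally
--     # assemble the output by walking the mask and consuming the buckets.
--     USA = "United States of America"
--     keep = [USA in str(x) and 'University' in str(x) for x in lst_univs]
--     elig = [str(x) for x, k in zip(lst_univs, keep) if k]
--     buckets = [[] for _ in elig]
--     for univ in name:
--         for b, s in zip(buckets, elig):
--             if univ in s:
--                 b.append(univ)
--     out = []
--     it = iter(buckets)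
--     for k in keep:
--         if k:
--             out.extend(next(it))
--         else:
--             out.append('NaN')
--     return out
-- ===== Notes on version B (the rewrite author's own statement) =====
-- stated objective: alternative
-- what changed: B transposes the matching: it precomputes an eligibility mask, keeps a match bucket only for each eligible affiliation, then iterates over the university names in the OUTER loop (eligible affiliations inner) filling the buckets, and finally assembles the output by walking the mask and consuming the buckets, instead of A's per-affiliation scan over an intermediate filtered/'NaN' list.
import Mathlib
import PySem

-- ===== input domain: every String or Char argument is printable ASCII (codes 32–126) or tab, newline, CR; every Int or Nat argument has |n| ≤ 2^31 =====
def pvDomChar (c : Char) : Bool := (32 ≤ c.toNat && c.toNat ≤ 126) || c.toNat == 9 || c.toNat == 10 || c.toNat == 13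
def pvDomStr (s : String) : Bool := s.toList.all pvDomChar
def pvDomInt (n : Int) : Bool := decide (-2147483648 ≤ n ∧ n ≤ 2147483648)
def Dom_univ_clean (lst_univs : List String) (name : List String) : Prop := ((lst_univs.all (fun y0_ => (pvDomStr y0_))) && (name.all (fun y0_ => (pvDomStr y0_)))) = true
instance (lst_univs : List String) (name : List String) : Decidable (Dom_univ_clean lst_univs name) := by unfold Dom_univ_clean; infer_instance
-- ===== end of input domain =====

-- B transposes the loop nesting (names outer, affiliations inner, per-affiliation buckets); objective: alternative.


-- ===== PORT A =====
def univ_clean (lst_univs : List String) (name : List String) : List String :=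
  let filtered_lst := lst_univs.foldl (fun acc x =>
    acc ++ [if PySem.Str.isIn "United States of America" x then x else "NaN"]) []
  filtered_lst.foldl (fun acc affil =>
    if affil == "NaN" then acc ++ ["NaN"]
    else if !(PySem.Str.isIn "University" affil) then acc ++ ["NaN"]
    else name.foldl (fun acc2 univ =>
      if PySem.Str.isIn univ affil then acc2 ++ [univ] else acc2) acc) []

-- ===== PORT B =====
-- B: eligibility mask, name-major accumulation into buckets kept only for the
-- eligible affiliations, then assembly by walking the mask and consuming the buckets.
def pvAssemble : List Bool → List (List String) → List String
  | [], _ => []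
  | true :: ks, b :: bs => b ++ pvAssemble ks bs
  | true :: ks, [] => pvAssemble ks []  -- unreachable: one bucket per true flag
  | false :: ks, bs => "NaN" :: pvAssemble ks bs

def univ_clean_alt (lst_univs : List String) (name : List String) : List String :=
  let keep := lst_univs.map (fun x =>
    PySem.Str.isIn "United States of America" x && PySem.Str.isIn "University" x)
  let elig := ((lst_univs.zip keep).filter (fun p => p.2)).map (fun p => p.1)
  let buckets := name.foldl (fun bs u =>
    List.zipWith (fun b s => if PySem.Str.isIn u s then b ++ [u] else b) bs elig)
    (elig.map (fun _ => []))
  pvAssemble keep buckets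

-- ===== PRECONDITION & SPEC =====
def Spec_univ_clean (lst_univs : List String) (name : List String) (out : List String) : Prop := out = univ_clean_alt lst_univs name
instance (lst_univs : List String) (name : List String) (out : List String) : Decidable (Spec_univ_clean lst_univs name out) := by unfold Spec_univ_clean; infer_instance

-- ===== CLAIM (what is proved, stated in full; the proofs are below) =====
def Claim_equal_univ_clean : Prop := ∀ (lst_univs : List String) (name : List String), Dom_univ_clean lst_univs name → Spec_univ_clean lst_univs name (univ_clean lst_univs name)

-- ===== LEMMAS AND PROOFS =====

-- A string containing "United States of America" cannot be the literal "NaN".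
theorem usa_ne_nan (x : String)
    (h : PySem.Str.isIn "United States of America" x = true) : (x == "NaN") = false := by
  by_cases hx : x = "NaN"
  · subst hx; exact absurd h (by decide)
  · simp [hx]

-- Per-affiliation body of A's second loop, as the list it appends.
theorem per_elem (name : List String) (x : String) :
    (fun affil => if affil == "NaN" then ["NaN"]
      else if !(PySem.Str.isIn "University" affil) then ["NaN"]
      else name.filter (fun u => PySem.Str.isIn u affil))
      (if PySem.Str.isIn "United States of America" x then x else "NaN")
    = (if PySem.Str.isIn "United States of America" x && PySem.Str.isIn "University" x then
        name.filter (fun u => PySem.Str.isIn u x)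
      else ["NaN"]) := by
  by_cases h1 : PySem.Str.isIn "United States of America" x = true
  · simp only [h1, if_true, Bool.true_and, usa_ne_nan x h1, Bool.false_eq_true, if_false]
    by_cases h2 : PySem.Str.isIn "University" x = true <;>
      simp [PySem.Str.isIn] at h2 <;> simp [h2]
  · simp [Bool.not_eq_true] at h1
    simp [h1]

-- A as a flatMap over the affiliations (the common normal form).
theorem a_flatMap (lst_univs : List String) (name : List String) :
    univ_clean lst_univs name
    = lst_univs.flatMap (fun x =>
        if PySem.Str.isIn "United States of America" x && PySem.Str.isIn "University" x then
          name.filter (fun u => PySem.Str.isIn u x)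
        else ["NaN"]) := by
  unfold univ_clean
  rw [PySem.List.foldl_append_singleton_eq_map, List.nil_append]
  rw [PySem.List.foldl_congr_mem (g := fun acc affil =>
        acc ++ (if affil == "NaN" then ["NaN"]
          else if !(PySem.Str.isIn "University" affil) then ["NaN"]
          else name.filter (fun u => PySem.Str.isIn u affil)))
      (h := by
        intro acc affil _
        by_cases h1 : affil == "NaN" <;> simp only [h1, if_pos, if_neg, Bool.false_eq_true,
          not_false_iff]
        by_cases h2 : !(PySem.Str.isIn "University" affil) <;>
          simp only [h2, ite_true]
        exact PySem.List.foldl_append_if_eq_filter _ _ _)]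
  rw [PySem.List.foldl_append_eq_flatMap, List.nil_append, List.flatMap_map]
  exact List.flatMap_congr (fun x _ => per_elem name x)

-- zipWith of a map of a list with the list itself.
theorem zipWith_map_same {α β γ : Type} (l : List α) (f : α → β) (h : β → α → γ) :
    List.zipWith h (l.map f) l = l.map (fun x => h (f x) x) := by
  induction l with
  | nil => rfl
  | cons x xs ih => simp [ih]

-- The eligible sublist is a filter of the original list.
theorem elig_filter (l : List String) (K : String → Bool) :
    ((l.zip (l.map K)).filter (fun p => p.2)).map (fun p => p.1) = l.filter K := by
  induction l with
  | nil => rfl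
  | cons x xs ih =>
    simp only [List.map_cons, List.zip_cons_cons, List.filter_cons]
    by_cases h : K x = true <;> simp [h, ih]

-- B's bucket fold, characterised: starting from elig.map f, each bucket ends as
-- its start extended by the names matching its affiliation.
theorem buckets_fold (name : List String) (elig : List String) (f : String → List String) :
    name.foldl (fun bs u =>
      List.zipWith (fun b s => if PySem.Str.isIn u s then b ++ [u] else b) bs elig)
      (elig.map f)
    = elig.map (fun s => f s ++ name.filter (fun u => PySem.Str.isIn u s)) := by
  induction name generalizing f with
  | nil => simp
  | cons u rest ih =>
    simp only [List.foldl_cons]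
    have hstep :
        List.zipWith (fun b s => if PySem.Str.isIn u s then b ++ [u] else b) (elig.map f) elig
        = elig.map (fun s => f s ++ (if PySem.Str.isIn u s then [u] else [])) := by
      rw [zipWith_map_same]
      exact List.map_congr_left (fun s _ => by split_ifs <;> simp)
    rw [hstep, ih]
    exact List.map_congr_left (fun s _ => by
      rw [List.filter_cons]; split_ifs <;> simp)

-- Assembly consumes one bucket per true flag, "NaN" per false flag.
theorem assemble_spec (l : List String) (K : String → Bool) (N : String → List String) :
    pvAssemble (l.map K) ((l.filter K).map N)
    = l.flatMap (fun x => if K x then N x else ["NaN"]) := by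
  induction l with
  | nil => rfl
  | cons x xs ih =>
    simp only [List.map_cons, List.filter_cons, List.flatMap_cons]
    by_cases h : K x = true
    · simp only [h, if_true, List.map_cons, pvAssemble, ih]
    · simp only [Bool.not_eq_true] at h
      simp only [h, Bool.false_eq_true, if_false, pvAssemble, ih]
      rfl

-- ===== VERDICT (by name: the statement is the Claim_ definition above) =====
theorem univ_clean_spec : Claim_equal_univ_clean := by
  intro lst_univs name _
  show univ_clean lst_univs name = univ_clean_alt lst_univs name
  rw [a_flatMap]
  simp only [univ_clean_alt]
  set K := fun x : String =>
    PySem.Str.isIn "United States of America" x && PySem.Str.isIn "University" x with hK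
  rw [elig_filter lst_univs K, buckets_fold name (lst_univs.filter K) (fun _ => []),
    List.map_congr_left (l := lst_univs.filter K)
      (f := fun s => ([] : List String) ++ name.filter (fun u => PySem.Str.isIn u s))
      (g := fun s => name.filter (fun u => PySem.Str.isIn u s))
      (fun s _ => List.nil_append _),
    assemble_spec lst_univs K (fun s => name.filter (fun u => PySem.Str.isIn u s))]
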